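-- pv_equiv track=rewrite | github.com/jschnab/leetcode | print_vertically.py | print_vertically2
-- ===== SOURCE A (Python) =====
-- def print_vertically2(sentence):
--     """
--     Print vertically a sentence.
--
--     This is another version or print_vertically which does not use Python
--     builtin functions.
--
--     :param str sentence: sentence to print vertically
--     :return list[str]:
--     """
--     splitted = sentence.split()
--
--     # output length is length of the longest word
--     max_length = 0
--     for sp in splitted:
--         max_length = max(max_length, len(sp))
--     output = [""] * max_length
--
--     # left-pad short words with spaces
--     for i, sp in enumerate(splitted):
--         if len(sp) < max_length:
--             splitted[i] += " " * (max_length - len(sp))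
--
--     # list of pointers to characters in `splitted`
--     pointers = [0] * len(splitted)
--
--     # we will iterate over characters with pointers until we reach
--     # each splitted word's end
--     lengths = [max_length] * len(splitted)
--
--     # iterate over characters and fill output
--     while pointers != lengths:
--         for i, p in enumerate(pointers):
--             output[p] += splitted[i][p]
--             pointers[i] += 1
--
--     # trailing spaces not allowed
--     return [o.rstrip() for o in output]
-- ===== SOURCE B (Python) =====
-- def print_vertically2(sentence):
--     # Word-major: fold the words one by one into a growing list of output rows,
--     # extending the row list (back-filled with spaces) whenever a longer word arrives.
--     rows = []
--     seen = 0
--     for w in sentence.split():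
--         while len(rows) < len(w):
--             rows.append(' ' * seen)
--         for j in range(len(rows)):
--             rows[j] += w[j] if j < len(w) else ' '
--         seen += 1
--     return [r.rstrip() for r in rows]
-- ===== Notes on version B (the rewrite author's own statement) =====
-- stated objective: alternative
-- what changed: B replaces A's pre-computed max length, padding pass and column-major pointers/lengths while-loop with a single word-major fold that grows the list of output rows incrementally, back-filling spaces when a longer word arrives.
import Mathlib
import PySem

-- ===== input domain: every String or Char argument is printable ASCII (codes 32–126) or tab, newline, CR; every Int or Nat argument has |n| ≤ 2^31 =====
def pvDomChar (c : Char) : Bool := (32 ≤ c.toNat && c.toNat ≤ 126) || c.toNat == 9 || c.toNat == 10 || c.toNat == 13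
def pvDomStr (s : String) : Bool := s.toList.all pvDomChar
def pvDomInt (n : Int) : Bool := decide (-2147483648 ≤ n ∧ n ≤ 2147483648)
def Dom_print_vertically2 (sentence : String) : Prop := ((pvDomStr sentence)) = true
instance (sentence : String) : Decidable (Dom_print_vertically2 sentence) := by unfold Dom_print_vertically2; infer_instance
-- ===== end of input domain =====

-- B replaces A's max-length/padding/pointers column-major state machine with a word-major fold
-- that grows the list of output rows incrementally (objective: alternative algorithm, same cost).

-- ===== PORT A =====
-- Strings are carried as List Char via the PySem.Chars primitives (exact on this domain).

-- 'splitted[i] += " " * (max_length - len(splitted[i]))' for one word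
def pvPadA (max_length : Nat) (sp : List Char) : List Char :=
  if sp.length < max_length then sp ++ List.replicate (max_length - sp.length) ' ' else sp

-- body of 'for i, p in enumerate(pointers): output[p] += splitted[i][p]; pointers[i] += 1'
def pvStepA (splitted : List (List Char)) (st : List (List Char) × List Nat)
    (ip : Int × Nat) : List (List Char) × List Nat :=
  let i := ip.1.toNat
  let p := ip.2
  (st.1.set p (st.1.getD p [] ++ [(splitted.getD i []).getD p ' ']),
   st.2.set i (st.2.getD i 0 + 1))

-- 'while pointers != lengths': the fuel only bounds the number of iterations
-- (max_length + 1 always suffices); the loop condition is checked exactly as in Python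
def pvLoopA (splitted : List (List Char)) (lengths : List Nat) :
    Nat → List (List Char) → List Nat → List (List Char)
  | 0, output, _ => output
  | fuel + 1, output, pointers =>
    if pointers = lengths then output
    else
      let st := (PySem.List.enumerate pointers).foldl (pvStepA splitted) (output, pointers)
      pvLoopA splitted lengths fuel st.1 st.2

def print_vertically2 (sentence : String) : List String :=
  let splitted := PySem.Chars.split₀ sentence.toList
  let max_length := splitted.foldl (fun acc sp => max acc sp.length) 0
  let output : List (List Char) := List.replicate max_length []
  let padded := splitted.map (pvPadA max_length)
  let pointers : List Nat := List.replicate padded.length 0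
  let lengths : List Nat := List.replicate padded.length max_length
  (pvLoopA padded lengths (max_length + 1) output pointers).map
    (fun o => String.ofList (PySem.Chars.rstrip o))

-- ===== PORT B =====
-- 'while len(rows) < len(w): rows.append(" " * seen)' appends until rows has len(w) entries
def pvExtendB (rows : List (List Char)) (seen n : Nat) : List (List Char) :=
  rows ++ List.replicate (n - rows.length) (List.replicate seen ' ')

-- body of 'for w in sentence.split(): …; seen += 1'; the indexed inner for-loop
-- 'for j in range(len(rows)): rows[j] += w[j] if j < len(w) else " "' is mapIdx
def pvStepB (st : List (List Char) × Nat) (w : List Char) : List (List Char) × Nat :=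
  let rows := pvExtendB st.1 st.2 w.length
  (rows.mapIdx (fun j r => r ++ [w.getD j ' ']), st.2 + 1)

def print_vertically2_alt (sentence : String) : List String :=
  let st := (PySem.Chars.split₀ sentence.toList).foldl pvStepB ([], 0)
  st.1.map (fun r => String.ofList (PySem.Chars.rstrip r))

-- ===== PRECONDITION & SPEC =====
def Spec_print_vertically2 (sentence : String) (out : List String) : Prop := out = print_vertically2_alt sentence
instance (sentence : String) (out : List String) : Decidable (Spec_print_vertically2 sentence out) := by unfold Spec_print_vertically2; infer_instance

-- ===== CLAIM (what is proved, stated in full; the proofs are below) =====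
def Claim_equal_print_vertically2 : Prop := ∀ (sentence : String), Dom_print_vertically2 sentence → Spec_print_vertically2 sentence (print_vertically2 sentence)

-- ===== LEMMAS AND PROOFS =====

-- running maximum word length (A's first loop; B's implicit row count)
def pvM (p : List (List Char)) : Nat := p.foldl (fun acc sp => max acc sp.length) 0

-- the j-th output row over words ws (before rstrip)
def pvRow (splitted : List (List Char)) (j : Nat) : List Char :=
  splitted.map (fun w => w.getD j ' ')

theorem pvM_ge (q : List (List Char)) : ∀ (a : Nat), a ≤ q.foldl (fun acc sp => max acc sp.length) a := by
  induction q with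
  | nil => intro a; simp
  | cons x xs ih =>
    intro a
    exact le_trans (le_max_left a x.length) (ih (max a x.length))

theorem pvM_mem_aux (w : List Char) (q : List (List Char)) : ∀ (a : Nat), w ∈ q →
    w.length ≤ q.foldl (fun acc sp => max acc sp.length) a := by
  induction q with
  | nil => intro a h; simp at h
  | cons x xs ih =>
    intro a h
    rcases List.mem_cons.mp h with h | h
    · subst h
      exact le_trans (le_max_right a w.length) (pvM_ge xs (max a w.length))
    · exact ih (max a x.length) h

theorem pvM_mem (p : List (List Char)) (w : List Char) (hw : w ∈ p) : w.length ≤ pvM p :=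
  pvM_mem_aux w p 0 hw

theorem pvM_append_singleton (p : List (List Char)) (w : List Char) :
    pvM (p ++ [w]) = max (pvM p) w.length := by
  simp [pvM, List.foldl_append]

-- a column past every word of p is all spaces
theorem pvRow_blank (p : List (List Char)) (j : Nat) (h : ∀ w ∈ p, w.length ≤ j) :
    pvRow p j = List.replicate p.length ' ' := by
  induction p with
  | nil => rfl
  | cons x xs ih =>
    have hx : x.getD j ' ' = ' ' := List.getD_eq_default _ _ (h x (by simp))
    simp only [pvRow, List.map_cons, List.length_cons, List.replicate_succ]
    rw [hx]
    have := ih (fun w hw => h w (by simp [hw]))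
    simp only [pvRow] at this
    rw [this]

theorem pvRow_append_singleton (p : List (List Char)) (w : List Char) (j : Nat) :
    pvRow (p ++ [w]) j = pvRow p j ++ [w.getD j ' '] := by
  simp [pvRow]

-- extending the canonical rows of p up to a new word's length stays canonical
theorem pvExtendB_canon (p : List (List Char)) (w : List Char) :
    pvExtendB ((List.range (pvM p)).map (pvRow p)) p.length w.length
      = (List.range (max (pvM p) w.length)).map (pvRow p) := by
  unfold pvExtendB
  by_cases h : w.length ≤ pvM p
  · simp [Nat.sub_eq_zero_of_le, h]
  · have hlt : pvM p < w.length := by omega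
    apply List.ext_getElem (by simp; omega)
    intro j h1 h2
    have hj : j < w.length := by simpa [max_eq_right (le_of_lt hlt)] using h2
    rw [List.getElem_append]
    split
    · rename_i hjm
      simp at hjm ⊢
    · rename_i hjm
      simp at hjm ⊢
      rw [pvRow_blank p j (fun w' hw' => le_trans (pvM_mem p w' hw') hjm)]

theorem pvMapIdx_range {α : Type} (N : Nat) (g : Nat → α) (f : Nat → α → α) :
    ((List.range N).map g).mapIdx (fun j r => f j r) = (List.range N).map (fun j => f j (g j)) := by
  apply List.ext_getElem (by simp)
  intro j h1 h2
  simp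

-- invariant of B's word-major fold
theorem pvFoldB (ws : List (List Char)) : ∀ (p : List (List Char)),
    ws.foldl pvStepB ((List.range (pvM p)).map (pvRow p), p.length)
      = ((List.range (pvM (p ++ ws))).map (pvRow (p ++ ws)), (p ++ ws).length) := by
  induction ws with
  | nil => intro p; simp
  | cons w rest ih =>
    intro p
    rw [List.foldl_cons]
    have hstep : pvStepB ((List.range (pvM p)).map (pvRow p), p.length) w
        = ((List.range (pvM (p ++ [w]))).map (pvRow (p ++ [w])), (p ++ [w]).length) := by
      unfold pvStepB
      simp only [pvExtendB_canon, pvMapIdx_range]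
      rw [pvM_append_singleton]
      simp only [Prod.mk.injEq]
      refine ⟨?_, by simp⟩
      apply List.map_congr_left
      intro j _
      rw [pvRow_append_singleton]
    rw [hstep, ih (p ++ [w])]
    simp

-- ---- lemmas for A's loop (unchanged from the A-side analysis) ----

theorem pvPadA_getD (m : Nat) (w : List Char) (j : Nat) :
    (pvPadA m w).getD j ' ' = w.getD j ' ' := by
  unfold pvPadA
  split
  · simp [List.getD_eq_getElem?_getD, List.getElem?_append, List.getElem?_replicate]
    rcases h : w[j]? with _ | c
    · have hj : ¬ j < w.length := by simpa [List.getElem?_eq_none_iff] using h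
      simp [hj]
      split <;> rfl
    · have hj : j < w.length := (List.getElem?_eq_some_iff.mp h).1
      simp [hj]
  · rfl

-- output state after k passes of the while loop
def pvOut (splitted : List (List Char)) (M k : Nat) : List (List Char) :=
  (List.range M).map (fun j => if j < k then pvRow splitted j else [])

-- one pass of the inner for-loop, generalized over the enumerate suffix
theorem pvInner (splitted : List (List Char)) (k : Nat) :
    ∀ (r s : Nat) (out : List (List Char)), s + r = splitted.length → k < out.length →
    (PySem.List.enumerate (List.replicate r k) (s : Int)).foldl (pvStepA splitted)
        (out, List.replicate s (k + 1) ++ List.replicate r k)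
    = (out.set k (out.getD k [] ++ ((splitted.drop s).map (fun w => w.getD k ' '))),
       List.replicate splitted.length (k + 1)) := by
  intro r
  induction r with
  | zero =>
    intro s out hs hk
    simp at hs
    subst hs
    simp [List.drop_eq_nil_of_le]
    rw [List.getElem?_eq_getElem hk, Option.getD_some, List.set_getElem_self]
  | succ r ih =>
    intro s out hs hk
    have hslen : s < splitted.length := by omega
    rw [List.replicate_succ, PySem.List.enumerate_cons, List.foldl_cons]
    have hstep : pvStepA splitted
        (out, List.replicate s (k+1) ++ k :: List.replicate r k) ((s:Int), k)
        = (out.set k (out.getD k [] ++ [(splitted.getD s []).getD k ' ']),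
           List.replicate (s+1) (k+1) ++ List.replicate r k) := by
      simp [pvStepA]
      simp [List.replicate_succ' (n := s), List.append_assoc]
    rw [hstep]
    have hcast : ((s:Int) + 1) = ((s+1 : Nat) : Int) := by push_cast; ring
    rw [hcast, ih (s+1) _ (by omega) (by simpa using hk)]
    have haux : ∀ (x ys : List Char),
        (out.set k x).set k ((out.set k x).getD k [] ++ ys) = out.set k (x ++ ys) := by
      intro x ys
      rw [List.set_set, List.getD_eq_getElem?_getD, List.getElem?_set_self hk, Option.getD_some]
    rw [haux, List.append_assoc]
    have hget : splitted.getD s [] = splitted[s] := by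
      rw [List.getD_eq_getElem?_getD, List.getElem?_eq_getElem hslen]; rfl
    rw [← List.getElem_cons_drop (as := splitted) (i := s) hslen, List.map_cons, hget]
    rfl

theorem pvOut_step (splitted : List (List Char)) (M k : Nat) (_hk : k < M) :
    (pvOut splitted M k).set k (pvRow splitted k) = pvOut splitted M (k + 1) := by
  unfold pvOut
  apply List.ext_getElem (by simp)
  intro j h1 h2
  have hj : j < M := by simpa using h2
  rw [List.getElem_set]
  simp only [List.getElem_map, List.getElem_range]
  by_cases h : k = j
  · subst h; simp
  · by_cases h' : j < k
    · simp [h, h', Nat.lt_succ_of_lt h']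
    · have hns : ¬ j < k + 1 := by omega
      simp [h, h', hns]

theorem pvOut_getD (splitted : List (List Char)) (M k : Nat) (hk : k < M) :
    (pvOut splitted M k).getD k [] = [] := by
  unfold pvOut
  rw [List.getD_eq_getElem?_getD, List.getElem?_map, List.getElem?_range hk]
  simp

-- the while loop fills the remaining rows
theorem pvOuter (splitted : List (List Char)) (M : Nat) (hn : splitted ≠ []) :
    ∀ (d fe k : Nat), k + d = M →
    pvLoopA splitted (List.replicate splitted.length M) (d + fe + 1)
        (pvOut splitted M k) (List.replicate splitted.length k)
    = (List.range M).map (pvRow splitted) := by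
  intro d
  induction d with
  | zero =>
    intro fe k hkd
    have hkM : k = M := by omega
    subst hkM
    rw [Nat.zero_add, pvLoopA, if_pos rfl]
    unfold pvOut
    apply List.map_congr_left
    intro j hj
    simp [List.mem_range] at hj
    simp [hj]
  | succ d ih =>
    intro fe k hkd
    have hk : k < M := by omega
    have hne : List.replicate splitted.length k ≠ List.replicate splitted.length M := by
      cases splitted with
      | nil => exact absurd rfl hn
      | cons a as =>
        simp [List.replicate_succ]
        omega
    have hfuel : d + 1 + fe + 1 = (d + fe + 1) + 1 := by omega
    rw [hfuel, pvLoopA, if_neg hne]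
    have hlen : k < (pvOut splitted M k).length := by simp [pvOut, hk]
    have hinner := pvInner splitted k splitted.length 0 (pvOut splitted M k) (by omega) hlen
    simp only [Nat.cast_zero, List.replicate_zero, List.nil_append, List.drop_zero] at hinner
    rw [hinner]
    simp only [pvOut_getD splitted M k hk, List.nil_append]
    have hrow : (pvOut splitted M k).set k (splitted.map fun w => w.getD k ' ')
        = pvOut splitted M (k + 1) := pvOut_step splitted M k hk
    rw [hrow]
    exact ih fe (k + 1) (by omega)

-- ===== VERDICT (by name: the statement is the Claim_ definition above) =====
theorem print_vertically2_spec : Claim_equal_print_vertically2 := by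
  unfold Claim_equal_print_vertically2
  intro sentence _
  unfold Spec_print_vertically2 print_vertically2 print_vertically2_alt
  simp only []
  generalize hws : PySem.Chars.split₀ sentence.toList = ws
  -- B side: the word-major fold produces the canonical column rows
  have hB := pvFoldB ws []
  simp only [pvM, List.foldl_nil, List.range_zero, List.map_nil, List.length_nil,
    List.nil_append] at hB
  rw [hB]
  generalize hMM : ws.foldl (fun acc sp => max acc sp.length) 0 = M
  by_cases hnil : ws = []
  · subst hnil
    simp at hMM
    subst hMM
    simp [pvLoopA]
  · -- A side
    have hpad : ws.map (pvPadA M) ≠ [] := by simpa using hnil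
    have hinit : List.replicate M [] = pvOut (ws.map (pvPadA M)) M 0 := by
      unfold pvOut
      simp [List.map_const']
    rw [hinit]
    have houter := pvOuter (ws.map (pvPadA M)) M hpad M 0 0 (by omega)
    rw [Nat.add_zero] at houter
    rw [houter, List.map_map, List.map_map]
    apply List.map_congr_left
    intro j _
    simp only [Function.comp]
    unfold pvRow
    rw [List.map_map]
    have hmap : List.map ((fun w => w.getD j ' ') ∘ pvPadA M) ws
        = List.map (fun w => w.getD j ' ') ws :=
      List.map_congr_left (fun w _ => pvPadA_getD M w j)
    rw [hmap]
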